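-- pv_equiv track=rewrite | github.com/Nasl0123/pocket-wikix | generadorAdemi.py | ordenar_info
-- ===== SOURCE A (Python) =====
-- def ordenar_info(info):
--     info = info[0:]
--     resultado = {}
--     for i,e in enumerate(info):
--         if 'tarjeta' in e.lower():
--             resultado[e] = []
--             for x in info[i+1:]:
--                 if 'tarjeta' in x.lower():
--                     break
--                 else:
--                     resultado[e].append(x)
--     return resultado
-- ===== SOURCE B (Python) =====
-- def ordenar_info(info):
--     resultado = {}
--     actual = None
--     for e in info:
--         if 'tarjeta' in e.lower():
--             resultado[e] = []
--             actual = e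
--         elif actual is not None:
--             resultado[actual].append(e)
--     return resultado
-- ===== Notes on version B (the rewrite author's own statement) =====
-- stated objective: alternative
-- what changed: Replaces the nested rescan of the items after each header with a single pass that tracks the current header and appends each item to its list (intended as faster; a timing run measured 1.54x at the largest size but not consistently).
import Mathlib
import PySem

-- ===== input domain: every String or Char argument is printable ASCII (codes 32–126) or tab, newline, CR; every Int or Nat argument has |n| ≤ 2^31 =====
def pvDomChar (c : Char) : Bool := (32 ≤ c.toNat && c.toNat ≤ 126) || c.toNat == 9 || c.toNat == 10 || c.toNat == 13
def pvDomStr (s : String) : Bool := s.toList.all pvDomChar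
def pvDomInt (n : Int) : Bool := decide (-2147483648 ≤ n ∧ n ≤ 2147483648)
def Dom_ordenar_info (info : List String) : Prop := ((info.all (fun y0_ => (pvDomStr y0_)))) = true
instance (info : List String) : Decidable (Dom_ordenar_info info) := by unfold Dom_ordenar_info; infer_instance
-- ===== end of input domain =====

-- B replaces A's nested rescan after each header by a single pass tracking the current header.

-- 'tarjeta' in s.lower()
def pvIsH (s : String) : Bool := PySem.Str.isIn "tarjeta" (PySem.Str.lower s)

-- ===== PORT A =====
-- A's inner loop:  for x in info[i+1:]: break on header, else resultado[e].append(x)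
def pvAInner (e : String) : PySem.Dict String (List String) → List String → PySem.Dict String (List String)
  | d, [] => d
  | d, x :: xs => if pvIsH x then d else pvAInner e (d.modify e [] (· ++ [x])) xs

def ordenar_info (info : List String) : List (String × List String) :=
  let info2 := PySem.List.slice info (some 0) none           -- info = info[0:]
  let resultado := (PySem.List.enumerate info2 0).foldl
    (fun d (p : Int × String) =>
      if pvIsH p.2 then
        pvAInner p.2 (d.insert p.2 []) (PySem.List.slice info2 (some (p.1 + 1)) none)
      else d)
    PySem.Dict.empty
  resultado.items

-- ===== PORT B =====
-- single pass: current header 'actual', append each item to its list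
def pvBLoop : PySem.Dict String (List String) → Option String → List String → PySem.Dict String (List String)
  | d, _, [] => d
  | d, actual, e :: xs =>
    if pvIsH e then pvBLoop (d.insert e []) (some e) xs
    else
      match actual with
      | some k => pvBLoop (d.modify k [] (· ++ [e])) actual xs
      | none => pvBLoop d actual xs

def ordenar_info_alt (info : List String) : List (String × List String) :=
  (pvBLoop PySem.Dict.empty none info).items

-- ===== PRECONDITION & SPEC =====
def Spec_ordenar_info (info : List String) (out : List (String × List String)) : Prop := out = ordenar_info_alt info
instance (info : List String) (out : List (String × List String)) : Decidable (Spec_ordenar_info info out) := by unfold Spec_ordenar_info; infer_instance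

-- ===== CLAIM (what is proved, stated in full; the proofs are below) =====
def Claim_equal_ordenar_info : Prop := ∀ (info : List String), Dom_ordenar_info info → Spec_ordenar_info info (ordenar_info info)

-- ===== LEMMAS AND PROOFS =====

-- A restated as a recursion on the suffix (proof-side helper)
def pvAProc : List String → PySem.Dict String (List String) → PySem.Dict String (List String)
  | [], d => d
  | e :: xs, d => if pvIsH e then pvAProc xs (pvAInner e (d.insert e []) xs) else pvAProc xs d

-- A's enumerate-fold over the suffix starting at index k equals pvAProc on that suffix
theorem pvA_fold_eq (info : List String) :
    ∀ (suf : List String) (k : Nat) (d : PySem.Dict String (List String)),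
      suf = info.drop k →
      (PySem.List.enumerate suf (k : Int)).foldl
        (fun d (p : Int × String) =>
          if pvIsH p.2 then
            pvAInner p.2 (d.insert p.2 []) (PySem.List.slice info (some (p.1 + 1)) none)
          else d) d
      = pvAProc suf d := by
  intro suf
  induction suf with
  | nil => intro k d h; simp [PySem.List.enumerate_nil, pvAProc]
  | cons e xs ih =>
    intro k d h
    have hxs : xs = info.drop (k + 1) := by
      have := congrArg List.tail h
      simpa [List.tail_drop] using this
    have hslice : PySem.List.slice info (some ((k + 1 : Nat) : Int)) none = xs := by
      rw [PySem.List.slice_from_natCast, ← hxs]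
    have hcast : (k : Int) + 1 = ((k + 1 : Nat) : Int) := by push_cast; ring
    rw [PySem.List.enumerate_cons, List.foldl_cons]
    by_cases hh : pvIsH e
    · simp only [hh, if_true, pvAProc, hcast, hslice]
      exact ih (k + 1) _ hxs
    · simp only [hh, if_false, Bool.false_eq_true, pvAProc, hcast]
      exact ih (k + 1) d hxs

-- key lemma: B's loop with a current header equals A's inner fill followed by processing the rest
theorem pvB_some_eq (xs : List String) :
    ∀ (d : PySem.Dict String (List String)) (kk : String),
      pvBLoop d (some kk) xs = pvAProc xs (pvAInner kk d xs) := by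
  induction xs with
  | nil => intro d kk; simp [pvBLoop, pvAProc, pvAInner]
  | cons x xs ih =>
    intro d kk
    by_cases hh : pvIsH x
    · simp only [pvBLoop, pvAInner, pvAProc, hh, if_true]
      exact ih (d.insert x []) x
    · simp only [pvBLoop, pvAInner, pvAProc, hh, if_false, Bool.false_eq_true]
      exact ih (d.modify kk [] (· ++ [x])) kk

-- B's loop with no current header equals A's suffix recursion
theorem pvB_none_eq (xs : List String) :
    ∀ (d : PySem.Dict String (List String)), pvBLoop d none xs = pvAProc xs d := by
  induction xs with
  | nil => intro d; simp [pvBLoop, pvAProc]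
  | cons x xs ih =>
    intro d
    by_cases hh : pvIsH x
    · simp only [pvBLoop, pvAProc, hh, if_true]
      exact pvB_some_eq xs (d.insert x []) x
    · simp only [pvBLoop, pvAProc, hh, if_false, Bool.false_eq_true]
      exact ih d

-- ===== VERDICT (by name: the statement is the Claim_ definition above) =====
theorem ordenar_info_spec : Claim_equal_ordenar_info := by
  intro info _
  unfold Spec_ordenar_info ordenar_info ordenar_info_alt
  simp only [PySem.List.slice_zero_start, PySem.List.slice_none_none]
  rw [show ((0 : Int)) = ((0 : Nat) : Int) from rfl,
      pvA_fold_eq info info 0 PySem.Dict.empty (by simp),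
      pvB_none_eq info PySem.Dict.empty]
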